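-- pv_equiv track=rewrite | github.com/chinuteja/SCALER | MODULE-5/SELECTION AND MERGE SORT/Q1. Maximum & Minimum Magic.py | solve
-- ===== SOURCE A (Python) =====
-- def solve(A):
--
-- 	A.sort()
-- 	min_magic,max_magic = 0,0
--
-- 	n = len(A)
-- 	p1 = 0
-- 	p2 = len(A)//2
-- 	mod = 10**9+7
--
-- 	while(p2<=len(A)-1):
--
-- 		max_magic = ((max_magic%mod) + (abs(A[p2]-A[p1])%mod))%mod
-- 		p1 += 1
-- 		p2 += 1
-- 	for i in range(1,n,2):
-- 		min_magic += abs(A[i] - A[i-1])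
--
-- 	# for i in range(n//2):
-- 	# 	max_magic += abs(A[n//2+i] - A[i])
--
-- 	return [max_magic,min_magic]
-- ===== SOURCE B (Python) =====
-- def solve(A):
--     A.sort()
--     n = len(A)
--     mod = 10**9 + 7
--     half = n // 2
--     max_magic = (sum(A[half:]) - sum(A[:n - half])) % mod
--     min_magic = sum(v if i % 2 else -v for i, v in enumerate(A[:2 * half]))
--     return [max_magic, min_magic]
-- ===== Notes on version B (the rewrite author's own statement) =====
-- stated objective: simpler
-- what changed: Both explicit loops with abs() and per-step modular accumulation are replaced by closed slice-sum arithmetic: after sorting, abs is dropped and max_magic becomes a single (sum(upper half) - sum(lower half)) % mod, while min_magic becomes an alternating-sign sum over the first 2*(n//2) elements instead of a stride-2 indexed pair loop.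
import Mathlib
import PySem

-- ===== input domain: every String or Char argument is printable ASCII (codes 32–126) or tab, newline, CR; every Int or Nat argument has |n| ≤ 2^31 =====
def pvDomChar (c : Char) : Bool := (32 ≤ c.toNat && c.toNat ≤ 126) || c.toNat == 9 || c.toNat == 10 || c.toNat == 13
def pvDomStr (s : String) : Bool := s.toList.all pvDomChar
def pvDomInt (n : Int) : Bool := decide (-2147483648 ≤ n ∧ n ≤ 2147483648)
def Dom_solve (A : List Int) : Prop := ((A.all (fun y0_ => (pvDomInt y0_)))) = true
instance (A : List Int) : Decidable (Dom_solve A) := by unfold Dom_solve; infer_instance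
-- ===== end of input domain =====

-- B replaces both index loops by closed slice-sum arithmetic (simpler, same cost);
-- A sorts its argument in place — the equivalence proved here is about the RETURN value
-- (B's Python performs the same in-place sort).

-- ===== PORT A =====
-- abs(x)
def pyAbs (x : Int) : Int := if x < 0 then -x else x

-- the 'while(p2 <= len(A)-1)' loop; p1,p2 start at 0 and len//2 ≥ 0 and only grow,
-- so they are Nat here and Python's 'p2 <= len(A)-1' over ints is exactly 'p2 < len'.
def solveMaxLoop (As : List Int) (md : Int) (p1 p2 : Nat) (acc : Int) : Int :=
  if p2 < As.length then
    solveMaxLoop As md (p1+1) (p2+1)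
      (PySem.Int.mod (PySem.Int.mod acc md
        + PySem.Int.mod (pyAbs (PySem.List.pyGetD As (p2 : Int) 0
            - PySem.List.pyGetD As (p1 : Int) 0)) md) md)
  else acc
  termination_by As.length - p2
  decreasing_by omega

def solve (A : List Int) : List Int :=
  let As := PySem.List.sorted A (fun x => x)
  let n : Int := As.length
  let md : Int := 10 ^ 9 + 7
  let maxMagic := solveMaxLoop As md 0 (As.length / 2) 0
  let minMagic := (PySem.List.pyRange 1 n 2).foldl
      (fun acc i => acc + pyAbs (PySem.List.pyGetD As i 0 - PySem.List.pyGetD As (i - 1) 0)) 0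
  [maxMagic, minMagic]

-- ===== PORT B =====
def solve_alt (A : List Int) : List Int :=
  let As := PySem.List.sorted A (fun x => x)
  let n : Int := As.length
  let md : Int := 10 ^ 9 + 7
  let half := PySem.Int.floordiv n 2
  let maxMagic := PySem.Int.mod
      ((PySem.List.slice As (some half) none).sum
        - (PySem.List.slice As none (some (n - half))).sum) md
  let minMagic := ((PySem.List.enumerate (PySem.List.slice As none (some (2 * half)))).map
      (fun p => if PySem.Int.mod p.1 2 ≠ 0 then p.2 else -p.2)).sum
  [maxMagic, minMagic]

-- ===== PRECONDITION & SPEC =====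
def Spec_solve (A : List Int) (out : List Int) : Prop := out = solve_alt A
instance (A : List Int) (out : List Int) : Decidable (Spec_solve A out) := by unfold Spec_solve; infer_instance

-- ===== CLAIM (what is proved, stated in full; the proofs are below) =====
def Claim_equal_solve : Prop := ∀ (A : List Int), Dom_solve A → Spec_solve A (solve A)

-- ===== LEMMAS AND PROOFS =====

-- the value summed by A's while loop, without the modular bookkeeping
def pairSum (L : List Int) (p1 p2 : Nat) : Int :=
  if p2 < L.length then
    pyAbs (L.getD p2 0 - L.getD p1 0) + pairSum L (p1 + 1) (p2 + 1)
  else 0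
  termination_by L.length - p2
  decreasing_by omega

lemma maxLoop_spec (L : List Int) (md : Int) (hmd : 0 < md) :
    ∀ t p1 p2 acc, L.length - p2 = t → PySem.Int.mod acc md = acc →
      solveMaxLoop L md p1 p2 acc = PySem.Int.mod (acc + pairSum L p1 p2) md := by
  intro t
  induction t with
  | zero =>
    intro p1 p2 acc ht hacc
    rw [solveMaxLoop, pairSum, if_neg (by omega), if_neg (by omega), add_zero, hacc]
  | succ t ih =>
    intro p1 p2 acc ht hacc
    have h : p2 < L.length := by omega
    rw [solveMaxLoop, pairSum, if_pos h, if_pos h]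
    rw [PySem.Int.mod_eq_emod_of_pos hmd] at hacc
    set v := pyAbs (PySem.List.pyGetD L (p2 : Int) 0 - PySem.List.pyGetD L (p1 : Int) 0) with hv
    have hget : L.getD p2 0 = PySem.List.pyGetD L (p2 : Int) 0 := by simp [pysem]
    have hget1 : L.getD p1 0 = PySem.List.pyGetD L (p1 : Int) 0 := by simp [pysem]
    rw [hget, hget1, ← hv]
    rw [ih (p1+1) (p2+1) _ (by omega) (by
      rw [PySem.Int.mod_eq_emod_of_pos hmd, PySem.Int.mod_eq_emod_of_pos hmd]
      exact Int.emod_emod_of_dvd _ dvd_rfl)]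
    simp only [PySem.Int.mod_eq_emod_of_pos hmd]
    calc ((acc % md + v % md) % md + pairSum L (p1+1) (p2+1))
        ≡ (acc % md + v % md) + pairSum L (p1+1) (p2+1) [ZMOD md] :=
          Int.ModEq.add_right _ (Int.emod_emod_of_dvd _ dvd_rfl)
      _ ≡ (acc + v) + pairSum L (p1+1) (p2+1) [ZMOD md] :=
          Int.ModEq.add_right _ (Int.ModEq.add (by rw [hacc]) (Int.emod_emod_of_dvd _ dvd_rfl))
      _ = acc + (v + pairSum L (p1+1) (p2+1)) := by ring

lemma pairSum_eq (L : List Int) (hs : L.Pairwise (· ≤ ·)) :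
    ∀ t p1 p2, L.length - p2 = t → p1 ≤ p2 →
      pairSum L p1 p2 = (L.drop p2).sum - ((L.drop p1).take (L.length - p2)).sum := by
  intro t
  induction t with
  | zero =>
    intro p1 p2 ht _
    rw [pairSum, if_neg (by omega)]
    rw [List.drop_eq_nil_of_le (by omega)]
    simp [Nat.sub_eq_zero_of_le (by omega : L.length ≤ p2)]
  | succ t ih =>
    intro p1 p2 ht hle
    have h2 : p2 < L.length := by omega
    have h1 : p1 < L.length := by omega
    rw [pairSum, if_pos h2, ih (p1+1) (p2+1) (by omega) (by omega)]
    have hmon : L.getD p1 0 ≤ L.getD p2 0 := by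
      rcases Nat.lt_or_ge p1 p2 with hlt | hge
      · have := List.pairwise_iff_getElem.mp hs p1 p2 h1 h2 hlt
        simpa [List.getD_eq_getElem?_getD, List.getElem?_eq_getElem, h1, h2] using this
      · have : p1 = p2 := by omega
        simp [this]
    have habs : pyAbs (L.getD p2 0 - L.getD p1 0) = L.getD p2 0 - L.getD p1 0 := by
      simp only [pyAbs]; rw [if_neg (by omega)]
    rw [habs]
    have hdrop2 : L.drop p2 = L[p2] :: L.drop (p2+1) := List.drop_eq_getElem_cons h2
    have hdrop1 : L.drop p1 = L[p1] :: L.drop (p1+1) := List.drop_eq_getElem_cons h1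
    have hn : L.length - p2 = (L.length - (p2+1)) + 1 := by omega
    rw [hdrop2, hdrop1, hn, List.take_succ_cons, List.sum_cons, List.sum_cons]
    have g2 : L.getD p2 0 = L[p2] := by simp [List.getD_eq_getElem?_getD, h2]
    have g1 : L.getD p1 0 = L[p1] := by simp [List.getD_eq_getElem?_getD, h1]
    rw [g1, g2]; ring

-- alternating-sign sum over an even-length list = sum of adjacent differences
lemma altSum_eq (m : Nat) : ∀ (ys : List Int) (j : Nat), ys.length = 2 * m →
    ((PySem.List.enumerate ys (2 * (j : Int))).map
        (fun p => if PySem.Int.mod p.1 2 ≠ 0 then p.2 else -p.2)).sum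
      = ((List.range m).map (fun k => ys.getD (2 * k + 1) 0 - ys.getD (2 * k) 0)).sum := by
  induction m with
  | zero =>
    intro ys j hlen
    have : ys = [] := List.eq_nil_of_length_eq_zero (by omega)
    simp [this, PySem.List.enumerate_nil]
  | succ m ih =>
    intro ys j hlen
    match ys with
    | a :: b :: rest =>
      have hr : rest.length = 2 * m := by simp at hlen; omega
      rw [PySem.List.enumerate_cons, PySem.List.enumerate_cons]
      have hs : (2 * (j : Int)) + 1 + 1 = 2 * ((j + 1 : Nat) : Int) := by push_cast; ring
      rw [hs]
      simp only [List.map_cons, List.sum_cons]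
      rw [ih rest (j+1) hr]
      have m0 : PySem.Int.mod (2 * (j : Int)) 2 = 0 := by
        rw [PySem.Int.mod_eq_emod_of_pos (by norm_num)]; omega
      have m1 : PySem.Int.mod (2 * (j : Int) + 1) 2 = 1 := by
        rw [PySem.Int.mod_eq_emod_of_pos (by norm_num)]; omega
      rw [List.range_succ_eq_map]
      simp only [List.map_cons, List.map_map, List.sum_cons, m0, m1]
      norm_num [Function.comp]
      have hmap : List.map ((fun k => (b :: rest)[2 * k]?.getD 0 - (a :: b :: rest)[2 * k]?.getD 0) ∘ Nat.succ) (List.range m)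
            = List.map (fun k => rest[2 * k + 1]?.getD 0 - rest[2 * k]?.getD 0) (List.range m) := by
        refine List.map_congr_left ?_
        intro k _
        simp only [Function.comp_apply, Nat.succ_eq_add_one]
        have e1 : 2 * (k + 1) = (2 * k + 1) + 1 := by omega
        rw [e1, List.getElem?_cons_succ, List.getElem?_cons_succ, List.getElem?_cons_succ]
      rw [hmap]; ring

-- getD through take, below the cut
lemma getD_take_of_lt (l : List Int) (t i : Nat) (d : Int) (h : i < t) :
    (l.take t).getD i d = l.getD i d := by
  simp [List.getD_eq_getElem?_getD]
  rw [List.getElem?_take]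
  simp [h]

lemma getD_mono (L : List Int) (hs : L.Pairwise (· ≤ ·)) (i j : Nat)
    (hij : i < j) (hj : j < L.length) : L.getD i 0 ≤ L.getD j 0 := by
  have := List.pairwise_iff_getElem.mp hs i j (by omega) hj hij
  simpa [List.getD_eq_getElem?_getD, List.getElem?_eq_getElem, hj, (by omega : i < L.length)] using this

-- ===== VERDICT (by name: the statement is the Claim_ definition above) =====
theorem solve_spec : Claim_equal_solve := by
  intro A _
  show solve A = solve_alt A
  unfold solve solve_alt
  set L := PySem.List.sorted A (fun x => x) with hL
  have hsort : L.Pairwise (· ≤ ·) := by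
    simpa using PySem.List.sorted_pairwise A (fun x => x)
  have hmle : L.length / 2 ≤ L.length := Nat.div_le_self _ _
  have h2m : 2 * (L.length / 2) ≤ L.length := by omega
  have hmd : (0 : Int) < 10 ^ 9 + 7 := by norm_num
  have hhalf : PySem.Int.floordiv ((L.length : Int)) 2 = ((L.length / 2 : Nat) : Int) := by
    exact_mod_cast PySem.Int.floordiv_natCast L.length 2
  show [solveMaxLoop L (10 ^ 9 + 7) 0 (L.length / 2) 0,
      (PySem.List.pyRange 1 ((L.length : Int)) 2).foldl
        (fun acc i => acc + pyAbs (PySem.List.pyGetD L i 0 - PySem.List.pyGetD L (i - 1) 0)) 0]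
    = [PySem.Int.mod
        ((PySem.List.slice L (some (PySem.Int.floordiv ((L.length : Int)) 2)) none).sum
          - (PySem.List.slice L none
              (some ((L.length : Int) - PySem.Int.floordiv ((L.length : Int)) 2))).sum) (10 ^ 9 + 7),
      ((PySem.List.enumerate (PySem.List.slice L none
          (some (2 * PySem.Int.floordiv ((L.length : Int)) 2)))).map
        (fun p => if PySem.Int.mod p.1 2 ≠ 0 then p.2 else -p.2)).sum]
  rw [hhalf]
  -- max side
  have h0 : PySem.Int.mod 0 (10 ^ 9 + 7) = 0 := by
    rw [PySem.Int.mod_eq_emod_of_pos hmd]; norm_num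
  have emax : solveMaxLoop L (10 ^ 9 + 7) 0 (L.length / 2) 0
      = PySem.Int.mod ((L.drop (L.length / 2)).sum
          - (L.take (L.length - L.length / 2)).sum) (10 ^ 9 + 7) := by
    rw [maxLoop_spec L _ hmd (L.length - L.length / 2) 0 (L.length / 2) 0 rfl h0,
        pairSum_eq L hsort (L.length - L.length / 2) 0 (L.length / 2) rfl (Nat.zero_le _),
        List.drop_zero, zero_add]
  have hs1 : PySem.List.slice L (some ((L.length / 2 : Nat) : Int)) none
      = L.drop (L.length / 2) := by
    rw [PySem.List.slice_from (xs := L) (a := ((L.length / 2 : Nat) : Int))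
        (Int.natCast_nonneg _)]
    congr 1
  have hs2 : PySem.List.slice L none (some ((L.length : Int) - ((L.length / 2 : Nat) : Int)))
      = L.take (L.length - L.length / 2) := by
    rw [PySem.List.slice_to (xs := L)
        (b := (L.length : Int) - ((L.length / 2 : Nat) : Int)) (by omega)]
    congr 1; omega
  have hs3 : PySem.List.slice L none (some (2 * ((L.length / 2 : Nat) : Int)))
      = L.take (2 * (L.length / 2)) := by
    rw [PySem.List.slice_to (xs := L) (b := 2 * ((L.length / 2 : Nat) : Int)) (by positivity)]
    congr 1
  rw [emax, hs1, hs2, hs3]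
  -- min side: both loops equal the mid-form sum of adjacent differences
  have hminA : (PySem.List.pyRange 1 ((L.length : Nat) : Int) 2).foldl
      (fun acc i => acc + pyAbs (PySem.List.pyGetD L i 0 - PySem.List.pyGetD L (i - 1) 0)) 0
      = ((List.range (L.length / 2)).map
          (fun k => L.getD (2 * k + 1) 0 - L.getD (2 * k) 0)).sum := by
    rw [PySem.List.foldl_add, PySem.List.pyRange_of_pos 1 ((L.length : Nat) : Int)
        (by norm_num : (0 : Int) < 2), zero_add]
    have hc : (if (1 : Int) < ((L.length : Nat) : Int)
        then ((((L.length : Nat) : Int) - 1 + 2 - 1) / 2).toNat else 0) = L.length / 2 := by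
      split <;> omega
    rw [hc, List.map_map]
    refine congrArg _ (List.map_congr_left ?_)
    intro k hk
    have hkm : k < L.length / 2 := List.mem_range.mp hk
    simp only [Function.comp_apply]
    have c1 : (1 : Int) + 2 * (k : Int) = ((2 * k + 1 : Nat) : Int) := by push_cast; ring
    rw [c1]
    have c2 : ((2 * k + 1 : Nat) : Int) - 1 = ((2 * k : Nat) : Int) := by push_cast; ring
    rw [c2]
    simp only [PySem.List.pyGetD_natCast]
    have hlt : 2 * k + 1 < L.length := by omega
    have := getD_mono L hsort (2 * k) (2 * k + 1) (by omega) hlt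
    simp only [pyAbs]
    rw [if_neg (by omega)]
  have hminB : ((PySem.List.enumerate (L.take (2 * (L.length / 2)))).map
      (fun p => if PySem.Int.mod p.1 2 ≠ 0 then p.2 else -p.2)).sum
      = ((List.range (L.length / 2)).map
          (fun k => L.getD (2 * k + 1) 0 - L.getD (2 * k) 0)).sum := by
    have hlen : (L.take (2 * (L.length / 2))).length = 2 * (L.length / 2) := by
      rw [List.length_take]; omega
    have hstart : PySem.List.enumerate (L.take (2 * (L.length / 2))) 0
        = PySem.List.enumerate (L.take (2 * (L.length / 2))) (2 * ((0 : Nat) : Int)) := by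
      norm_num
    rw [hstart, altSum_eq (L.length / 2) (L.take (2 * (L.length / 2))) 0 hlen]
    refine congrArg _ (List.map_congr_left ?_)
    intro k hk
    have hkm : k < L.length / 2 := List.mem_range.mp hk
    rw [getD_take_of_lt L (2 * (L.length / 2)) (2 * k + 1) 0 (by omega),
        getD_take_of_lt L (2 * (L.length / 2)) (2 * k) 0 (by omega)]
  rw [hminA, hminB]
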